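-- pv_equiv track=rewrite | github.com/musculoskeletal/gias3.fieldwork | src/gias3/fieldwork/field/template_fields.py | _tri_hemisphere_reverse_mapper
-- ===== SOURCE A (Python) =====
-- def _tri_hemisphere_reverse_mapper(elements):
--     # maps tri_hemispheres in reverse (starting from apex) for use in the
--     # sphere generator
--     remap = {0: elements + 1, 1: elements + 2, 2: elements + 3, 5: 1, 3: 2, 4: 0}
--
--     # 1st elements
--
--     # other elements
--     old_t1 = 6
--     old_t2 = 8
--     new_t1 = elements + 4
--     new_t2 = 3
--
--     for i in range(1, elements):
--         remap[old_t1] = new_t1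
--         if i < elements - 1:
--             remap[old_t1 + 1] = new_t1 + 1
--             remap[old_t2] = new_t2
--
--         old_t1 += 3
--         new_t1 += 2
--         old_t2 += 3
--         new_t2 += 1
--
--     return remap
-- ===== SOURCE B (Python) =====
-- def _tri_hemisphere_reverse_mapper(elements):
--     # Tail keys are exactly the contiguous run 6..3*elements; each value is a
--     # closed-form function of the key, chosen by k mod 3. No running
--     # accumulators and no per-iteration guard.
--     remap = {0: elements + 1, 1: elements + 2, 2: elements + 3, 5: 1, 3: 2, 4: 0}
--     for k in range(6, 3 * elements + 1):
--         q, r = divmod(k, 3)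
--         if r == 0:
--             v = elements + 2 * q
--         elif r == 1:
--             v = elements + 2 * q + 1
--         else:
--             v = q + 1
--         remap[k] = v
--     return remap
-- ===== Notes on version B (the rewrite author's own statement) =====
-- stated objective: simpler
-- what changed: Replaced the four running accumulators (old_t1/old_t2/new_t1/new_t2) and the i<elements-1 guard by a single loop over the contiguous key run 6..3*elements whose value is a closed-form function of the key via divmod(k,3).
import Mathlib
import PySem

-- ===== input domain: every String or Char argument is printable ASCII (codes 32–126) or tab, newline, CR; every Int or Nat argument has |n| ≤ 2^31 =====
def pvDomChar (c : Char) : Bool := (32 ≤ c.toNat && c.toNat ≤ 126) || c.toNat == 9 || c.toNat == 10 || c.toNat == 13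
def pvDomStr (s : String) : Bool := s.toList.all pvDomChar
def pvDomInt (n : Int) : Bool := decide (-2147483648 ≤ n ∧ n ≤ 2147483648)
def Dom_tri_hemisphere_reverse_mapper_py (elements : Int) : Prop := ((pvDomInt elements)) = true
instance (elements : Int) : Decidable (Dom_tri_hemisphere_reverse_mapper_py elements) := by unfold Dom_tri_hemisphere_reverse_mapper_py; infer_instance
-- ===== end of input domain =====

-- B replaces A's four running accumulators and per-iteration guard by one loop over the
-- contiguous key run 6..3*elements with a closed-form value per key (objective: simpler).

-- ===== PORT A =====
def tri_hemisphere_reverse_mapper_py (elements : Int) : List (Int × Int) :=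
  let remap : PySem.Dict Int Int :=
    PySem.Dict.mk [(0, elements + 1), (1, elements + 2), (2, elements + 3), (5, 1), (3, 2), (4, 0)]
  let st :=
    (PySem.List.pyRange 1 elements 1).foldl
      (fun (s : PySem.Dict Int Int × Int × Int × Int × Int) i =>
        let remap := s.1
        let old_t1 := s.2.1
        let old_t2 := s.2.2.1
        let new_t1 := s.2.2.2.1
        let new_t2 := s.2.2.2.2
        let remap := remap.insert old_t1 new_t1
        let remap :=
          if i < elements - 1 then
            (remap.insert (old_t1 + 1) (new_t1 + 1)).insert old_t2 new_t2
          else remap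
        (remap, old_t1 + 3, old_t2 + 3, new_t1 + 2, new_t2 + 1))
      (remap, 6, 8, elements + 4, 3)
  st.1.items

-- ===== PORT B =====
def tri_hemisphere_reverse_mapper_py_alt (elements : Int) : List (Int × Int) :=
  let remap : PySem.Dict Int Int :=
    PySem.Dict.mk [(0, elements + 1), (1, elements + 2), (2, elements + 3), (5, 1), (3, 2), (4, 0)]
  ((PySem.List.pyRange 6 (3 * elements + 1) 1).foldl
      (fun remap k =>
        let q := PySem.Int.floordiv k 3
        let r := PySem.Int.mod k 3
        let v := if r == 0 then elements + 2 * q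
                 else if r == 1 then elements + 2 * q + 1
                 else q + 1
        remap.insert k v)
      remap).items

-- ===== PRECONDITION & SPEC =====
def Spec_tri_hemisphere_reverse_mapper_py (elements : Int) (out : List (Int × Int)) : Prop := out = tri_hemisphere_reverse_mapper_py_alt elements
instance (elements : Int) (out : List (Int × Int)) : Decidable (Spec_tri_hemisphere_reverse_mapper_py elements out) := by unfold Spec_tri_hemisphere_reverse_mapper_py; infer_instance

-- ===== CLAIM (what is proved, stated in full; the proofs are below) =====
def Claim_equal_tri_hemisphere_reverse_mapper_py : Prop := ∀ (elements : Int), Dom_tri_hemisphere_reverse_mapper_py elements → Spec_tri_hemisphere_reverse_mapper_py elements (tri_hemisphere_reverse_mapper_py elements)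

-- ===== LEMMAS AND PROOFS =====

-- the base dict's items, and B's closed-form value at key k
def pvBase (e : Int) : List (Int × Int) :=
  [(0, e + 1), (1, e + 2), (2, e + 3), (5, 1), (3, 2), (4, 0)]

def pvGval (e k : Int) : Int :=
  let q := PySem.Int.floordiv k 3
  let r := PySem.Int.mod k 3
  if r == 0 then e + 2 * q else if r == 1 then e + 2 * q + 1 else q + 1

-- A's loop body, named for the proofs (definitionally the port's fold function)
def pvStepA (e : Int) (s : PySem.Dict Int Int × Int × Int × Int × Int) (i : Int) :
    PySem.Dict Int Int × Int × Int × Int × Int :=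
  let remap := s.1
  let old_t1 := s.2.1
  let old_t2 := s.2.2.1
  let new_t1 := s.2.2.2.1
  let new_t2 := s.2.2.2.2
  let remap := remap.insert old_t1 new_t1
  let remap :=
    if i < e - 1 then
      (remap.insert (old_t1 + 1) (new_t1 + 1)).insert old_t2 new_t2
    else remap
  (remap, old_t1 + 3, old_t2 + 3, new_t1 + 2, new_t2 + 1)

lemma pvGval_t1 (e c : Int) : pvGval e (3 * c + 3) = e + 2 * c + 2 := by
  simp [pvGval]; omega

lemma pvGval_t1' (e c : Int) : pvGval e (3 * c + 4) = e + 2 * c + 3 := by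
  simp [pvGval]; omega

lemma pvGval_t2 (e c : Int) : pvGval e (3 * c + 5) = c + 2 := by
  simp [pvGval]; omega

lemma pvFresh (e m k : Int) (h6 : 6 ≤ k) (hm : m ≤ k) :
    (PySem.Dict.mk (pvBase e ++ (PySem.List.pyRange 6 m 1).map (fun k' => (k', pvGval e k')))).contains k = false := by
  rw [Bool.eq_false_iff]
  intro h
  rw [PySem.Dict.contains_iff_mem_keys] at h
  simp [PySem.Dict.keys, pvBase, PySem.List.mem_pyRange_one] at h
  omega

lemma pvFullA (e : Int) : ∀ c : Int, 1 ≤ c → c ≤ e - 1 →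
    (PySem.List.pyRange 1 c 1).foldl (pvStepA e)
      (PySem.Dict.mk (pvBase e), 6, 8, e + 4, 3)
    = (PySem.Dict.mk (pvBase e ++ (PySem.List.pyRange 6 (3 * c + 3) 1).map (fun k => (k, pvGval e k))),
        3 * c + 3, 3 * c + 5, e + 2 * c + 2, c + 2) := by
  intro c hc1
  induction c, hc1 using Int.le_induction with
  | base =>
    intro _
    rw [PySem.List.pyRange_one_eq_nil le_rfl,
        PySem.List.pyRange_one_eq_nil (by norm_num : (3:Int)*1+3 ≤ 6)]
    simp only [List.foldl_nil, List.map_nil, List.append_nil]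
    norm_num
    omega
  | succ c hc1 ih =>
    intro hce
    rw [PySem.List.pyRange_one_succ_right (by omega : (1:Int) ≤ c), List.foldl_append,
        ih (by omega)]
    simp only [List.foldl_cons, List.foldl_nil]
    have hcond : c < e - 1 := by omega
    have f1 := pvFresh e (3*c+3) (3*c+3) (by omega) le_rfl
    have f2 : ((PySem.Dict.mk (pvBase e ++ (PySem.List.pyRange 6 (3*c+3) 1).map (fun k => (k, pvGval e k)))).insert (3*c+3) (e+2*c+2)).contains (3*c+3+1) = false := by
      rw [PySem.Dict.contains_insert, pvFresh e (3*c+3) (3*c+3+1) (by omega) (by omega)]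
      simp
    have f3 : (((PySem.Dict.mk (pvBase e ++ (PySem.List.pyRange 6 (3*c+3) 1).map (fun k => (k, pvGval e k)))).insert (3*c+3) (e+2*c+2)).insert (3*c+3+1) (e+2*c+2+1)).contains (3*c+5) = false := by
      rw [PySem.Dict.contains_insert, PySem.Dict.contains_insert,
          pvFresh e (3*c+3) (3*c+5) (by omega) (by omega)]
      simp
      omega
    unfold pvStepA
    simp only [if_pos hcond, Prod.mk.injEq]
    refine ⟨?_, by ring, by ring, by ring, by ring⟩
    apply PySem.Dict.ext
    rw [PySem.Dict.items_insert_of_not_contains _ _ f3,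
        PySem.Dict.items_insert_of_not_contains _ _ f2,
        PySem.Dict.items_insert_of_not_contains _ _ f1]
    have h1 : (3:Int)*(c+1)+3 = (3*c+5)+1 := by ring
    rw [h1, PySem.List.pyRange_one_succ_right (by omega : (6:Int) ≤ 3*c+5),
        show (3:Int)*c+5 = (3*c+4)+1 from by ring,
        PySem.List.pyRange_one_succ_right (by omega : (6:Int) ≤ 3*c+4),
        show (3:Int)*c+4 = (3*c+3)+1 from by ring,
        PySem.List.pyRange_one_succ_right (by omega : (6:Int) ≤ 3*c+3)]
    have e1 : (3:Int)*c+3+1 = 3*c+4 := by ring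
    have e2 : e+2*c+2+1 = e+2*c+3 := by ring
    have e3 : (3:Int)*c+4+1 = 3*c+5 := by ring
    simp [pvGval_t1, pvGval_t1', pvGval_t2, e1, e2, e3]

lemma pvAlt_eq (e : Int) :
    tri_hemisphere_reverse_mapper_py_alt e
    = pvBase e ++ (PySem.List.pyRange 6 (3 * e + 1) 1).map (fun k => (k, pvGval e k)) := by
  show ((PySem.List.pyRange 6 (3 * e + 1) 1).foldl
      (fun d a => d.insert a (pvGval e a)) (PySem.Dict.mk (pvBase e))).items = _
  rw [PySem.Dict.items_foldl_insert_fresh _ (fun a => a) (pvGval e) _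
      (by
        intro a ha
        rw [PySem.List.mem_pyRange_one] at ha
        rw [Bool.eq_false_iff]
        intro h
        rw [PySem.Dict.contains_iff_mem_keys] at h
        simp [PySem.Dict.keys, pvBase] at h
        omega)
      (by simpa using PySem.List.nodup_pyRange_one 6 (3 * e + 1))]

lemma pvA_eq (e : Int) :
    tri_hemisphere_reverse_mapper_py e
    = pvBase e ++ (PySem.List.pyRange 6 (3 * e + 1) 1).map (fun k => (k, pvGval e k)) := by
  show (((PySem.List.pyRange 1 e 1).foldl (pvStepA e)
      (PySem.Dict.mk (pvBase e), 6, 8, e + 4, 3)).1).items = _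
  by_cases h2 : 2 ≤ e
  · have hsplit : PySem.List.pyRange 1 e 1 = PySem.List.pyRange 1 (e-1) 1 ++ [e-1] := by
      have := PySem.List.pyRange_one_succ_right (a := 1) (b := e-1) (by omega)
      simpa using this
    rw [hsplit, List.foldl_append, pvFullA e (e-1) (by omega) le_rfl]
    simp only [List.foldl_cons, List.foldl_nil]
    have hcond : ¬ (e - 1 < e - 1) := lt_irrefl _
    unfold pvStepA
    simp only [if_neg hcond]
    show ((PySem.Dict.mk _).insert (3*(e-1)+3) (e+2*(e-1)+2)).items = _
    rw [PySem.Dict.items_insert_of_not_contains _ _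
      (pvFresh e (3*(e-1)+3) (3*(e-1)+3) (by omega) le_rfl)]
    have h1 : (3:Int) * e + 1 = (3*(e-1)+3) + 1 := by ring
    rw [h1, PySem.List.pyRange_one_succ_right (by omega : (6:Int) ≤ 3*(e-1)+3)]
    have hv : pvGval e (3*(e-1)+3) = e+2*(e-1)+2 := pvGval_t1 e (e-1)
    simp [hv]
  · rw [PySem.List.pyRange_one_eq_nil (by omega : e ≤ 1),
        PySem.List.pyRange_one_eq_nil (by omega : (3:Int)*e+1 ≤ 6)]
    simp

-- ===== VERDICT (by name: the statement is the Claim_ definition above) =====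
theorem tri_hemisphere_reverse_mapper_py_spec : Claim_equal_tri_hemisphere_reverse_mapper_py := by
  intro e _
  show _ = _
  rw [pvA_eq, pvAlt_eq]
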